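-- pv_equiv track=rewrite | github.com/dareg/surfex-cmake | gen_modi.py | simplify_code
-- ===== SOURCE A (Python) =====
-- def simplify_code(src):
--     # Remove comments, remove double spaces, join lines using continuation marker (&)
--     lines = []
--     buf = ""
--     for line in src:
--         line = line.strip()
--         if line.startswith("!"):
--             continue
--         while "  " in line:
--             line = line.replace("  ", " ")
--         if not line.startswith("#") and not line.startswith("INCLUDE "):
--             line = line.upper()
--         if "!" in line and not line.startswith("#"):
--             # When '!' is in the middle of a line, most of the time what follow it is comment.
--             # But sometimes, it is a negation in an ifdef, see: #if ! defined foo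
--             line = line.split("!")[0].strip()
--         if line.endswith("&"):
--             buf += line.replace("&", "")
--         else:
--             lines.append(buf + line.replace("&", "") + "\n")
--             buf = ""
--     return lines
-- ===== SOURCE B (Python) =====
-- def _collapse(s):
--     # one-pass run-of-spaces collapse (A does iterated replace("  ", " "))
--     out = []
--     prev = False
--     for ch in s:
--         sp = (ch == ' ')
--         if not (sp and prev):
--             out.append(ch)
--         prev = sp
--     return ''.join(out)
--
--
-- def _clean(line):
--     line = line.strip()
--     if line.startswith("!"):
--         return None
--     line = _collapse(line)
--     if not line.startswith("#") and not line.startswith("INCLUDE "):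
--         line = line.upper()
--     if "!" in line and not line.startswith("#"):
--         line = line.split("!")[0].strip()
--     return (line.replace("&", ""), line.endswith("&"))
--
--
-- def simplify_code(src):
--     out = []
--     buf = []
--     for core, cont in (p for p in map(_clean, src) if p is not None):
--         buf.append(core)
--         if not cont:
--             out.append("".join(buf) + "\n")
--             buf = []
--     return out
-- ===== Notes on version B (the rewrite author's own statement) =====
-- stated objective: alternative
-- what changed: B replaces A's single stateful loop with a two-pass pipeline: a per-line cleaner (with a one-pass previous-char space collapse instead of A's iterated replace(' ',' ') loop) feeding a recursive assembler that joins '&'-continuations.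
import Mathlib
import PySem

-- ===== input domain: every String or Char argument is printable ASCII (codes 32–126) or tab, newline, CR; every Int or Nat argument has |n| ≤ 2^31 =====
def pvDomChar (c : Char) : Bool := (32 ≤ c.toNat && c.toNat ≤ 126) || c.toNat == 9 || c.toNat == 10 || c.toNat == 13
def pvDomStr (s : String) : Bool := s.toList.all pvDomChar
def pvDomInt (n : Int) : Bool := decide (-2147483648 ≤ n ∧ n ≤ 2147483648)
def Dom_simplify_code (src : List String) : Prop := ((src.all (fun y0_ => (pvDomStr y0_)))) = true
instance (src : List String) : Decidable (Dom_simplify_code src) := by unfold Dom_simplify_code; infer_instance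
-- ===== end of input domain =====

-- B restructures A's single stateful loop into a two-pass pipeline (one-pass space
-- collapse, per-line cleaning, then a recursive continuation assembler); same results.

-- ===== PORT A =====

-- direct description of one pass of line.replace("  ", " "), used to prove termination
def pvRep2 : List Char → List Char
  | [] => []
  | c :: t =>
    if c = ' ' ∧ t.head? = some ' ' then ' ' :: pvRep2 t.tail else c :: pvRep2 t
termination_by l => l.length
decreasing_by
  · simp only [List.length_cons, List.length_tail]; omega
  · simp

theorem pvPrefix_pair (c : Char) (t : List Char) :
    [' ', ' '] <+: c :: t ↔ c = ' ' ∧ t.head? = some ' ' := by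
  cases t with
  | nil => simp [List.cons_prefix_cons]
  | cons d r => simp [List.cons_prefix_cons, eq_comm]

theorem pvInfix_pair (c : Char) (t : List Char) :
    [' ', ' '] <:+: c :: t ↔ (c = ' ' ∧ t.head? = some ' ') ∨ [' ', ' '] <:+: t := by
  rw [List.infix_cons_iff, pvPrefix_pair]

theorem pvGo_succ (fuel : Nat) (c : Char) (t acc : List Char) :
    PySem.Chars.replace.go [' ', ' '] [' '] (fuel + 1) (c :: t) acc =
    if [' ', ' '].isPrefixOf (c :: t) = true
    then PySem.Chars.replace.go [' ', ' '] [' '] fuel (t.drop 1) ([' '] ++ acc)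
    else PySem.Chars.replace.go [' ', ' '] [' '] fuel t (c :: acc) := rfl

theorem pvGo_eq (fuel : Nat) (l acc : List Char) (h : l.length ≤ fuel) :
    PySem.Chars.replace.go [' ', ' '] [' '] fuel l acc = acc.reverse ++ pvRep2 l := by
  induction fuel generalizing l acc with
  | zero =>
    have hl : l = [] := by cases l <;> simp_all
    subst hl
    rw [PySem.Chars.replace.go.eq_def]; simp [pvRep2]
  | succ n ih =>
    cases l with
    | nil => rw [PySem.Chars.replace.go.eq_def]; simp [pvRep2]
    | cons c t =>
      rw [pvGo_succ]
      by_cases hp : [' ', ' '].isPrefixOf (c :: t) = true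
      · rw [if_pos hp]
        rw [List.isPrefixOf_iff_prefix, pvPrefix_pair] at hp
        obtain ⟨hc, ht⟩ := hp
        cases t with
        | nil => simp at ht
        | cons d r =>
          simp only [List.head?_cons, Option.some.injEq] at ht
          subst hc; subst ht
          simp only [List.drop_succ_cons, List.drop_zero, List.singleton_append]
          rw [ih r (' ' :: acc) (by simp at h ⊢; omega)]
          rw [pvRep2]
          simp
      · rw [if_neg hp]
        rw [ih t (c :: acc) (by simp at h ⊢; omega)]
        rw [List.isPrefixOf_iff_prefix, pvPrefix_pair] at hp
        rw [pvRep2, if_neg hp]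
        simp

theorem pvRep2_eq_replace (l : List Char) :
    PySem.Chars.replace l [' ', ' '] [' '] = pvRep2 l := by
  rw [PySem.Chars.replace]
  simp only [List.isEmpty_cons, if_false, Bool.false_eq_true]
  exact pvGo_eq l.length l [] le_rfl

theorem pvRep2_le (l : List Char) : (pvRep2 l).length ≤ l.length := by
  induction l using pvRep2.induct with
  | case1 => simp [pvRep2]
  | case2 c t hc ih => rw [pvRep2, if_pos hc]; simp at ih ⊢; cases t <;> simp_all <;> omega
  | case3 c t hc ih => rw [pvRep2, if_neg hc]; simpa using ih

theorem pvRep2_lt (l : List Char) (h : [' ', ' '] <:+: l) :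
    (pvRep2 l).length < l.length := by
  induction l using pvRep2.induct with
  | case1 => simp at h
  | case2 c t hc ih =>
    rw [pvRep2, if_pos hc]
    have := pvRep2_le t.tail
    cases t with
    | nil => simp at hc
    | cons d r => simp at this ⊢; omega
  | case3 c t hc ih =>
    rw [pvRep2, if_neg hc]
    rw [pvInfix_pair] at h
    rcases h with h | h
    · exact absurd h hc
    · simpa using ih h

theorem replace_len_lt (s : String) (h : PySem.Str.isIn "  " s = true) :
    (PySem.Str.replace s "  " " ").toList.length < s.toList.length := by
  rw [PySem.Str.toList_replace]
  have h2 : [' ', ' '] <:+: s.toList := by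
    rw [PySem.Str.isIn_iff_infix] at h; simpa using h
  have : ("  ".toList : List Char) = [' ', ' '] := by decide
  rw [this, (by decide : (" ".toList : List Char) = [' '])]
  rw [pvRep2_eq_replace]
  exact pvRep2_lt _ h2

-- while "  " in line: line = line.replace("  ", " ")
def collapseA (s : String) : String :=
  if h : PySem.Str.isIn "  " s = true then collapseA (PySem.Str.replace s "  " " ") else s
termination_by s.toList.length
decreasing_by exact replace_len_lt s h

def simplify_code (src : List String) : List String :=
  (src.foldl (fun (acc : List String × String) line =>
    let (lines, buf) := acc
    let line := PySem.Str.strip line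
    if PySem.Str.startswith line "!" then (lines, buf)
    else
      let line := collapseA line
      let line := if ¬ PySem.Str.startswith line "#" ∧ ¬ PySem.Str.startswith line "INCLUDE "
        then PySem.Str.upper line else line
      let line := if PySem.Str.isIn "!" line ∧ ¬ PySem.Str.startswith line "#"
        then PySem.Str.strip ((((PySem.Str.split? line "!").getD [line]).headD line))
        else line
      if PySem.Str.endswith line "&" then (lines, buf ++ PySem.Str.replace line "&" "")
      else (lines ++ [buf ++ PySem.Str.replace line "&" "" ++ "\n"], "")) ([], "")).1

-- ===== PORT B =====

def collapseB (s : String) : String :=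
  String.ofList (s.toList.foldl (fun (acc : List Char × Bool) ch =>
    let sp := ch == ' '
    (if sp && acc.2 then acc.1 else acc.1 ++ [ch], sp)) ([], false)).1

def cleanLine (line : String) : Option (String × Bool) :=
  let line := PySem.Str.strip line
  if PySem.Str.startswith line "!" then none
  else
    let line := collapseB line
    let line := if ¬ PySem.Str.startswith line "#" ∧ ¬ PySem.Str.startswith line "INCLUDE "
      then PySem.Str.upper line else line
    let line := if PySem.Str.isIn "!" line ∧ ¬ PySem.Str.startswith line "#"
      then PySem.Str.strip ((((PySem.Str.split? line "!").getD [line]).headD line))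
      else line
    some (PySem.Str.replace line "&" "", PySem.Str.endswith line "&")

def simplify_code_alt (src : List String) : List String :=
  ((src.filterMap cleanLine).foldl (fun (acc : List String × List String) pc =>
    let (out, buf) := acc
    let buf := buf ++ [pc.1]
    if pc.2 then (out, buf)
    else (out ++ [PySem.Str.join "" buf ++ "\n"], ([] : List String))) ([], [])).1

-- ===== PRECONDITION & SPEC =====
def Spec_simplify_code (src : List String) (out : List String) : Prop := out = simplify_code_alt src
instance (src : List String) (out : List String) : Decidable (Spec_simplify_code src out) := by unfold Spec_simplify_code; infer_instance

-- ===== CLAIM (what is proved, stated in full; the proofs are below) =====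
def Claim_equal_simplify_code : Prop := ∀ (src : List String), Dom_simplify_code src → Spec_simplify_code src (simplify_code src)

-- ===== LEMMAS AND PROOFS =====

-- one-pass squeeze as structural recursion
def pvSq : Bool → List Char → List Char
  | _, [] => []
  | prev, c :: t =>
    if c = ' ' then (if prev then pvSq true t else ' ' :: pvSq true t) else c :: pvSq false t

theorem pvFold_sq (l : List Char) (out : List Char) (prev : Bool) :
    (l.foldl (fun (acc : List Char × Bool) ch =>
      let sp := ch == ' '
      (if sp && acc.2 then acc.1 else acc.1 ++ [ch], sp)) (out, prev)).1 = out ++ pvSq prev l := by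
  induction l generalizing out prev with
  | nil => simp [pvSq]
  | cons c t ih =>
    simp only [List.foldl_cons]
    by_cases hc : c = ' '
    · subst hc
      cases prev with
      | false => rw [ih]; simp [pvSq]
      | true => rw [ih]; simp [pvSq]
    · rw [ih]
      have hb : (c == ' ') = false := by simp [hc]
      simp [pvSq, hc, hb]

theorem collapseB_eq_sq (s : String) : collapseB s = String.ofList (pvSq false s.toList) := by
  unfold collapseB
  rw [pvFold_sq]
  simp

theorem sq_rep2 (l : List Char) (prev : Bool) : pvSq prev (pvRep2 l) = pvSq prev l := by
  induction l using pvRep2.induct generalizing prev with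
  | case1 => simp [pvRep2]
  | case2 c t hc ih =>
    obtain ⟨hc1, hc2⟩ := hc
    cases t with
    | nil => simp at hc2
    | cons d r =>
      simp only [List.head?_cons, Option.some.injEq] at hc2
      subst hc1; subst hc2
      rw [pvRep2, if_pos ⟨rfl, rfl⟩]
      simp only [List.tail_cons] at ih ⊢
      cases prev with
      | false => simp only [pvSq, if_pos rfl]; simp [ih]
      | true => simp only [pvSq, if_pos rfl]; simp [ih]
  | case3 c t hc ih =>
    rw [pvRep2, if_neg hc]
    by_cases h : c = ' '
    · subst h
      cases prev with
      | false => simp [pvSq, ih]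
      | true => simp [pvSq, ih]
    · simp [pvSq, h, ih]

theorem sq_of_no_double_aux (l : List Char) (h : ¬ [' ', ' '] <:+: l) :
    pvSq false l = l ∧ (l.head? ≠ some ' ' → pvSq true l = l) := by
  induction l with
  | nil => simp [pvSq]
  | cons c t ih =>
    rw [pvInfix_pair] at h
    push_neg at h
    obtain ⟨h1, h2⟩ := h
    obtain ⟨ihf, iht⟩ := ih h2
    by_cases hc : c = ' '
    · subst hc
      have ht : t.head? ≠ some ' ' := h1 rfl
      constructor
      · simp [pvSq, iht ht]
      · intro hh; simp at hh
    · constructor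
      · simp [pvSq, hc, ihf]
      · intro _; simp [pvSq, hc, ihf]

theorem sq_of_no_double (l : List Char) (h : ¬ [' ', ' '] <:+: l) :
    pvSq false l = l := (sq_of_no_double_aux l h).1

theorem collapseA_eq_sq (s : String) : collapseA s = String.ofList (pvSq false s.toList) := by
  induction s using collapseA.induct with
  | case1 s h ih =>
    rw [collapseA, dif_pos h, ih]
    have : (PySem.Str.replace s "  " " ").toList = pvRep2 s.toList := by
      rw [PySem.Str.toList_replace,
        (by decide : ("  ".toList : List Char) = [' ', ' ']),
        (by decide : (" ".toList : List Char) = [' '])]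
      exact pvRep2_eq_replace s.toList
    rw [this, sq_rep2]
  | case2 s h =>
    rw [collapseA, dif_neg h]
    have h2 : ¬ [' ', ' '] <:+: s.toList := by
      intro hc
      apply h
      rw [PySem.Str.isIn_iff_infix]
      simpa using hc
    rw [sq_of_no_double _ h2]
    exact String.ofList_toList.symm

theorem collapseA_eq_collapseB (s : String) : collapseA s = collapseB s := by
  rw [collapseA_eq_sq, collapseB_eq_sq]

def assemble : String → List (String × Bool) → List String
  | _, [] => []
  | buf, (core, cont) :: rest =>
    if cont then assemble (buf ++ core) rest else (buf ++ core ++ "\n") :: assemble "" rest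

def pvStepB : List String × List String → String × Bool → List String × List String :=
  fun (acc : List String × List String) pc =>
    let (out, buf) := acc
    let buf := buf ++ [pc.1]
    if pc.2 then (out, buf)
    else (out ++ [PySem.Str.join "" buf ++ "\n"], ([] : List String))

theorem cjoin_empty_append (ls : List (List Char)) (x : List Char) :
    PySem.Chars.join [] (ls ++ [x]) = PySem.Chars.join [] ls ++ x := by
  induction ls with
  | nil => simp [PySem.Chars.join_singleton, PySem.Chars.join_nil]
  | cons a t ih =>
    cases t with
    | nil => simp [PySem.Chars.join_cons_cons, PySem.Chars.join_singleton, PySem.Chars.join_nil]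
    | cons b r =>
      simp only [List.cons_append, PySem.Chars.join_cons_cons] at ih ⊢
      simp [ih]

theorem sjoin_empty_append (l : List String) (x : String) :
    PySem.Str.join "" (l ++ [x]) = PySem.Str.join "" l ++ x := by
  apply String.toList_inj.mp
  simp [PySem.Str.toList_join, cjoin_empty_append]

theorem sjoin_empty_nil : PySem.Str.join "" ([] : List String) = "" := by
  apply String.toList_inj.mp
  simp [PySem.Str.toList_join, PySem.Chars.join_nil]

theorem loopB (pieces : List (String × Bool)) (out : List String) (bufL : List String) :
    (pieces.foldl pvStepB (out, bufL)).1 = out ++ assemble (PySem.Str.join "" bufL) pieces := by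
  induction pieces generalizing out bufL with
  | nil => simp [assemble]
  | cons pc rest ih =>
    obtain ⟨core, cont⟩ := pc
    simp only [List.foldl_cons]
    cases cont with
    | true =>
      show (rest.foldl pvStepB (pvStepB (out, bufL) (core, true))).1 = _
      simp only [pvStepB, if_true]
      rw [ih, sjoin_empty_append]
      simp [assemble]
    | false =>
      show (rest.foldl pvStepB (pvStepB (out, bufL) (core, false))).1 = _
      simp only [pvStepB, Bool.false_eq_true, if_false]
      rw [ih, sjoin_empty_nil]
      simp [assemble, sjoin_empty_append]

-- the cleaned text and continuation flag of a non-comment line (proof-only names)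
def clLine (line : String) : String :=
  let line := PySem.Str.strip line
  let line := collapseB line
  let line := if ¬ PySem.Str.startswith line "#" ∧ ¬ PySem.Str.startswith line "INCLUDE "
    then PySem.Str.upper line else line
  if PySem.Str.isIn "!" line ∧ ¬ PySem.Str.startswith line "#"
    then PySem.Str.strip ((((PySem.Str.split? line "!").getD [line]).headD line))
    else line

def clCore (line : String) : String := PySem.Str.replace (clLine line) "&" ""
def clCont (line : String) : Bool := PySem.Str.endswith (clLine line) "&"

def pvStepA : List String × String → String → List String × String :=
  fun (acc : List String × String) line =>
    let (lines, buf) := acc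
    let line := PySem.Str.strip line
    if PySem.Str.startswith line "!" then (lines, buf)
    else
      let line := collapseA line
      let line := if ¬ PySem.Str.startswith line "#" ∧ ¬ PySem.Str.startswith line "INCLUDE "
        then PySem.Str.upper line else line
      let line := if PySem.Str.isIn "!" line ∧ ¬ PySem.Str.startswith line "#"
        then PySem.Str.strip ((((PySem.Str.split? line "!").getD [line]).headD line))
        else line
      if PySem.Str.endswith line "&" then (lines, buf ++ PySem.Str.replace line "&" "")
      else (lines ++ [buf ++ PySem.Str.replace line "&" "" ++ "\n"], "")

theorem stepA_comment (acc : List String × String) (l : String)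
    (h : PySem.Str.startswith (PySem.Str.strip l) "!" = true) : pvStepA acc l = acc := by
  obtain ⟨lines, buf⟩ := acc
  simp only [pvStepA, h, if_true]

theorem cleanLine_comment (l : String)
    (h : PySem.Str.startswith (PySem.Str.strip l) "!" = true) : cleanLine l = none := by
  simp only [cleanLine, h, if_true]

theorem stepA_eq (acc : List String × String) (l : String)
    (h : PySem.Str.startswith (PySem.Str.strip l) "!" = false) :
    pvStepA acc l = if clCont l then (acc.1, acc.2 ++ clCore l)
      else (acc.1 ++ [acc.2 ++ clCore l ++ "\n"], "") := by
  obtain ⟨lines, buf⟩ := acc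
  simp only [pvStepA, clCont, clCore, clLine, collapseA_eq_collapseB, h,
    Bool.false_eq_true, if_false]

theorem cleanLine_eq (l : String)
    (h : PySem.Str.startswith (PySem.Str.strip l) "!" = false) :
    cleanLine l = some (clCore l, clCont l) := by
  simp only [cleanLine, clCont, clCore, clLine, h, Bool.false_eq_true, if_false]

theorem simplify_loop (src : List String) (lines : List String) (buf : String) :
    (src.foldl pvStepA (lines, buf)).1 = lines ++ assemble buf (src.filterMap cleanLine) := by
  induction src generalizing lines buf with
  | nil => simp [assemble]
  | cons l t ih =>
    simp only [List.foldl_cons, List.filterMap_cons]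
    cases h1 : PySem.Str.startswith (PySem.Str.strip l) "!" with
    | true =>
      rw [stepA_comment _ _ h1, cleanLine_comment _ h1]
      exact ih lines buf
    | false =>
      rw [stepA_eq _ _ h1, cleanLine_eq _ h1]
      cases h2 : clCont l with
      | true =>
        simp only [if_true]
        rw [ih]
        simp [assemble]
      | false =>
        simp only [Bool.false_eq_true, if_false]
        rw [ih]
        simp [assemble]

-- ===== VERDICT (by name: the statement is the Claim_ definition above) =====
theorem simplify_code_spec : Claim_equal_simplify_code := by
  intro src _
  unfold Spec_simplify_code
  have hA : simplify_code src = [] ++ assemble "" (src.filterMap cleanLine) := by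
    show (src.foldl pvStepA ([], "")).1 = _
    exact simplify_loop src [] ""
  have hB : simplify_code_alt src
      = [] ++ assemble (PySem.Str.join "" []) (src.filterMap cleanLine) := by
    show ((src.filterMap cleanLine).foldl pvStepB ([], [])).1 = _
    exact loopB _ [] []
  rw [hA, hB, sjoin_empty_nil]
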